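-- pv_equiv track=rewrite | github.com/EmmaEmmEmm/ProgramPython | 程式設計作業-郭忠義/上機考2/dna.py | dna_r
-- ===== SOURCE A (Python) =====
-- def is_prime(n):
--     if n == 1:
--         return False
--     for i in range(2, int(n/2)+1):
--         if n % i == 0:
--             return False
--     return True
--
-- def dna_r(s, e, dna):
--     i = 0
--     genes = []
--     while i < len(dna):
--         if dna[i:i+len(s)] == s:
--             s_l= i + len(s)
--             for j in range(s_l, len(dna)):
--                 if dna[j:j+3] in e and is_prime(len(dna[s_l:j])):
--                     genes.append(dna[s_l:j])
--                     break
--         i += 1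
--     genes = sorted(genes)
--     genes = sorted(genes, key=len)
--     return genes if genes else ["No gene"]
-- ===== SOURCE B (Python) =====
-- def is_prime(n):
--     if n == 1:
--         return False
--     for i in range(2, int(n/2)+1):
--         if n % i == 0:
--             return False
--     return True
--
-- def _first_at_least(ends, x):
--     # binary search: first index t with ends[t] >= x (ends is sorted increasing)
--     lo, hi = 0, len(ends)
--     while lo < hi:
--         mid = (lo + hi) // 2
--         if ends[mid] < x:
--             lo = mid + 1
--         else:
--             hi = mid
--     return lo
--
-- def dna_r(s, e, dna):
--     n = len(dna)
--     starts = [i for i in range(n) if dna[i:i+len(s)] == s]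
--     ends = [j for j in range(n) if dna[j:j+3] in e] if starts else []
--     genes = []
--     for i in starts:
--         s_l = i + len(s)
--         for t in range(_first_at_least(ends, s_l), len(ends)):
--             j = ends[t]
--             if is_prime(j - s_l):
--                 genes.append(dna[s_l:j])
--                 break
--     return sorted(sorted(genes), key=len) or ["No gene"]
-- ===== Notes on version B (the rewrite author's own statement) =====
-- stated objective: alternative
-- what changed: B precomputes the list of start positions in one pass and (only when a start exists) the sorted list of end-codon positions in another, then per start binary-searches the end list for the first position past the gene start and walks it by index, instead of A's per-start rescan of the whole tail with a fresh codon slice and membership test at every index; the is_prime helper and the two-pass sorted output are kept unchanged.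
import Mathlib
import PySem

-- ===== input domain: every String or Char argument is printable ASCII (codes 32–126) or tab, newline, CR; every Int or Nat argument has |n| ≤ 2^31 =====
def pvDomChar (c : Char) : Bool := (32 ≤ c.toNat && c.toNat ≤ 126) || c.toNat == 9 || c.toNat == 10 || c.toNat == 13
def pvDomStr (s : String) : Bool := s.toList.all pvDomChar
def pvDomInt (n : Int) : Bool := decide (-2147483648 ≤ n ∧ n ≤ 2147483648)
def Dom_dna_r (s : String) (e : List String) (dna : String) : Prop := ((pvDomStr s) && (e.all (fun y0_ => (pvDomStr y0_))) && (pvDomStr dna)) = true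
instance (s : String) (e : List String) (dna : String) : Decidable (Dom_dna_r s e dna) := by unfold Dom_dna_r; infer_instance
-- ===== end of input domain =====

-- B precomputes the end-codon positions and the start positions in single passes and binary-searches
-- the sorted end list per start (then walks it by index), instead of A's per-start rescan of the whole
-- tail with a codon slice and membership test at every index; an alternative decomposition of the same
-- cost (the final sorting and the is_prime helper are kept unchanged).

-- shared helper: the module's is_prime, used unchanged by both A's and B's Python (transliteration)
def pyIsPrime (n : Nat) : Bool :=
  if n = 1 then false
  else (List.range' 2 (n / 2 + 1 - 2)).all (fun i => decide (n % i ≠ 0))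

-- ===== PORT A =====
def dna_r (s : String) (e : List String) (dna : String) : List String :=
  let sl := s.toList
  let dl := dna.toList
  let el := e.map String.toList
  let n := dl.length
  -- while i < len(dna): if dna[i:i+len(s)] == s: inner for-loop over range(s_l, len(dna)) with break
  let genes : List String := (List.range n).foldl (fun (acc : List String) (i : Nat) =>
    if PySem.List.slice dl (some ↑i) (some (↑i + ↑sl.length)) = sl then
      let s_l := i + sl.length
      match (List.range' s_l (n - s_l)).find? (fun (j : Nat) =>
          decide (PySem.List.slice dl (some ↑j) (some (↑j + 3)) ∈ el) &&
          pyIsPrime (PySem.List.slice dl (some ↑s_l) (some ↑j)).length) with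
      | some j => acc ++ [String.ofList (PySem.List.slice dl (some ↑s_l) (some ↑j))]
      | none => acc
    else acc) []
  let genes := PySem.List.sorted genes id
  let genes := PySem.List.sorted genes (fun g => PySem.Str.len g)
  if genes = [] then ["No gene"] else genes

-- ===== PORT B =====
-- _first_at_least's while-loop (hand-written bisect_left), transliterated
def pyFALGo (ends : List Nat) (x lo hi : Nat) : Nat :=
  if lo < hi then
    let mid := (lo + hi) / 2
    if ends.getD mid 0 < x then pyFALGo ends x (mid + 1) hi
    else pyFALGo ends x lo mid
  else lo
termination_by hi - lo
decreasing_by all_goals omega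

def pyFirstAtLeast (ends : List Nat) (x : Nat) : Nat := pyFALGo ends x 0 ends.length

def dna_r_alt (s : String) (e : List String) (dna : String) : List String :=
  let sl := s.toList
  let dl := dna.toList
  let el := e.map String.toList
  let n := dl.length
  let starts := (List.range n).filter (fun (i : Nat) =>
    decide (PySem.List.slice dl (some ↑i) (some (↑i + ↑sl.length)) = sl))
  let ends := if starts = [] then [] else (List.range n).filter (fun (j : Nat) =>
    decide (PySem.List.slice dl (some ↑j) (some (↑j + 3)) ∈ el))
  let genes : List String := starts.foldl (fun (acc : List String) (i : Nat) =>
    let s_l := i + sl.length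
    -- for t in range(_first_at_least(ends, s_l), len(ends)): j = ends[t]; if is_prime(j - s_l): append; break
    match (List.range' (pyFirstAtLeast ends s_l) (ends.length - pyFirstAtLeast ends s_l)).find?
        (fun (t : Nat) => pyIsPrime (ends.getD t 0 - s_l)) with
    | some t => acc ++ [String.ofList (PySem.List.slice dl (some ↑s_l) (some ↑(ends.getD t 0)))]
    | none => acc) []
  let genes := PySem.List.sorted genes id
  let genes := PySem.List.sorted genes (fun g => PySem.Str.len g)
  if genes = [] then ["No gene"] else genes

-- ===== PRECONDITION & SPEC =====
def Spec_dna_r (s : String) (e : List String) (dna : String) (out : List String) : Prop := out = dna_r_alt s e dna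
instance (s : String) (e : List String) (dna : String) (out : List String) : Decidable (Spec_dna_r s e dna out) := by unfold Spec_dna_r; infer_instance

-- ===== CLAIM (what is proved, stated in full; the proofs are below) =====
def Claim_equal_dna_r : Prop := ∀ (s : String) (e : List String) (dna : String), Dom_dna_r s e dna → Spec_dna_r s e dna (dna_r s e dna)

-- ===== LEMMAS AND PROOFS =====

theorem find?_congr_mem {α : Type} : ∀ (l : List α) (p q : α → Bool),
    (∀ x ∈ l, p x = q x) → l.find? p = l.find? q
  | [], _, _, _ => rfl
  | a :: t, p, q, h => by
    simp only [List.find?_cons]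
    rw [h a (by simp)]
    cases hq : q a
    · exact find?_congr_mem t p q (fun x hx => h x (by simp [hx]))
    · rfl

/-- the binary search keeps its invariants: everything below the result is < x,
    everything from the result on is ≥ x -/
theorem falGo_bounds (l : List Nat) (x : Nat)
    (hmono : ∀ a b : Nat, a ≤ b → b < l.length → l.getD a 0 ≤ l.getD b 0) :
    ∀ (k lo hi : Nat), hi - lo ≤ k → lo ≤ hi → hi ≤ l.length →
      (∀ t, t < lo → l.getD t 0 < x) →
      (∀ t, hi ≤ t → t < l.length → x ≤ l.getD t 0) →
      (∀ t, t < pyFALGo l x lo hi → l.getD t 0 < x) ∧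
      (∀ t, pyFALGo l x lo hi ≤ t → t < l.length → x ≤ l.getD t 0) := by
  intro k
  induction k with
  | zero =>
    intro lo hi hk _ _ hlow hhigh
    rw [pyFALGo]
    simp only [if_neg (by omega : ¬ lo < hi)]
    exact ⟨hlow, fun t ht => hhigh t (by omega)⟩
  | succ k ih =>
    intro lo hi hk hlh hhi hlow hhigh
    rw [pyFALGo]
    by_cases h : lo < hi
    · simp only [if_pos h]
      by_cases hc : l.getD ((lo + hi) / 2) 0 < x
      · simp only [if_pos hc]
        refine ih ((lo + hi) / 2 + 1) hi (by omega) (by omega) hhi ?_ hhigh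
        intro t ht
        exact lt_of_le_of_lt (hmono t ((lo + hi) / 2) (by omega) (by omega)) hc
      · simp only [if_neg hc]
        refine ih lo ((lo + hi) / 2) (by omega) (by omega) (by omega) hlow ?_
        intro t hmt htl
        exact le_trans (Nat.not_lt.mp hc) (hmono ((lo + hi) / 2) t hmt htl)
    · simp only [if_neg h]
      exact ⟨hlow, fun t ht htl => hhigh t (by omega) htl⟩

/-- on a strictly increasing list, searching from the bisected position with the
    x ≤ j guard dropped finds the same element as scanning the whole list -/
theorem find?_drop_firstAtLeast (ends : List Nat) (x : Nat) (P : Nat → Bool)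
    (hpw : ends.Pairwise (· < ·)) :
    ends.find? (fun j => decide (x ≤ j) && P j)
    = (ends.drop (pyFirstAtLeast ends x)).find? P := by
  have hmono : ∀ a b : Nat, a ≤ b → b < ends.length → ends.getD a 0 ≤ ends.getD b 0 := by
    intro a b hab hb
    rcases Nat.eq_or_lt_of_le hab with rfl | hlt
    · exact le_rfl
    · rw [List.getD_eq_getElem ends 0 (by omega), List.getD_eq_getElem ends 0 hb]
      exact le_of_lt (List.pairwise_iff_getElem.mp hpw a b (by omega) hb hlt)
  have hb := falGo_bounds ends x hmono ends.length 0 ends.length (by omega) (by omega)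
    le_rfl (by omega) (by omega)
  have hlo : ∀ t, t < pyFirstAtLeast ends x → ends.getD t 0 < x := hb.1
  have hhi : ∀ t, pyFirstAtLeast ends x ≤ t → t < ends.length → x ≤ ends.getD t 0 := hb.2
  conv_lhs => rw [← List.take_append_drop (pyFirstAtLeast ends x) ends]
  rw [List.find?_append]
  have h1 : (ends.take (pyFirstAtLeast ends x)).find? (fun j => decide (x ≤ j) && P j) = none := by
    rw [List.find?_eq_none]
    intro y hy
    obtain ⟨i, hi, hiy⟩ := List.mem_take_iff_getElem.mp hy
    have : ends.getD i 0 < x := hlo i (by omega)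
    rw [List.getD_eq_getElem ends 0 (by omega), hiy] at this
    simp
    intro hxy
    omega
  rw [h1, Option.none_or]
  apply find?_congr_mem
  intro y hy
  obtain ⟨i, hi, hiy⟩ := List.mem_drop_iff_getElem.mp hy
  have : x ≤ ends.getD (pyFirstAtLeast ends x + i) 0 := hhi _ (by omega) (by omega)
  rw [List.getD_eq_getElem ends 0 (by omega), hiy] at this
  simp [this]

/-- the binary search result never exceeds hi -/
theorem falGo_le (l : List Nat) (x : Nat) : pyFirstAtLeast l x ≤ l.length := by
  suffices h : ∀ (k lo hi : Nat), hi - lo ≤ k → lo ≤ hi → pyFALGo l x lo hi ≤ hi by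
    exact h l.length 0 l.length (by omega) (by omega)
  intro k
  induction k with
  | zero =>
    intro lo hi hk hlh
    rw [pyFALGo]
    simp only [if_neg (by omega : ¬ lo < hi)]
    omega
  | succ k ih =>
    intro lo hi hk hlh
    rw [pyFALGo]
    by_cases h : lo < hi
    · simp only [if_pos h]
      by_cases hc : l.getD ((lo + hi) / 2) 0 < x
      · simp only [if_pos hc]
        exact ih ((lo + hi) / 2 + 1) hi (by omega) (by omega)
      · simp only [if_neg hc]
        exact le_trans (ih lo ((lo + hi) / 2) (by omega) (by omega)) (by omega)
    · simp only [if_neg h]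
      omega

/-- the index loop over range(t0, len(l)) finds the value the element loop over l[t0:] finds -/
theorem find?_range'_getD (l : List Nat) (P : Nat → Bool) :
    ∀ (k t0 : Nat), l.length - t0 = k → t0 ≤ l.length →
    ((List.range' t0 (l.length - t0)).find? (fun t => P (l.getD t 0))).map (fun t => l.getD t 0)
    = (l.drop t0).find? P := by
  intro k
  induction k with
  | zero =>
    intro t0 hk ht
    rw [hk, List.drop_eq_nil_of_le (by omega)]
    simp
  | succ k ih =>
    intro t0 hk ht
    have hlt : t0 < l.length := by omega
    rw [hk, List.range'_succ, List.drop_eq_getElem_cons hlt]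
    simp only [List.find?_cons]
    rw [List.getD_eq_getElem l 0 hlt]
    cases hP : P l[t0] with
    | true => simp [List.getD, List.getElem?_eq_getElem hlt]
    | false =>
      have hk' : l.length - (t0 + 1) = k := by omega
      have := ih (t0 + 1) hk' (by omega)
      rw [hk'] at this
      simpa using this

/-- B's search of the precomputed end list equals A's scan of the tail range. -/
theorem inner_find_eq (memE P : Nat → Bool) (s_l n : Nat) :
    List.find? (fun (j : Nat) => decide (s_l ≤ j) && P j) ((List.range n).filter memE)
    = List.find? (fun j => memE j && (decide (s_l ≤ j) && P j)) (List.range' s_l (n - s_l)) := by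
  rw [List.find?_filter]
  by_cases hle : s_l ≤ n
  · have hsplit : List.range n = List.range' 0 s_l ++ List.range' s_l (n - s_l) := by
      rw [List.range_eq_range']
      have := List.range'_append (s := 0) (m := s_l) (n := n - s_l) (step := 1)
      simp only [Nat.zero_add, Nat.one_mul] at this
      have h2 : s_l + (n - s_l) = n := by omega
      rw [h2] at this
      exact this.symm
    rw [hsplit, List.find?_append]
    have h1 : List.find? (fun a => decide (memE a = true ∧ (decide (s_l ≤ a) && P a) = true)) (List.range' 0 s_l) = none := by
      rw [List.find?_eq_none]
      intro x hx
      have : x < s_l := by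
        have := List.mem_range'_1.mp hx; omega
      simp [Nat.not_le.mpr this]
    rw [h1, Option.none_or]
    apply find?_congr_mem
    intro x hx
    simp
  · have h0 : n - s_l = 0 := by omega
    rw [h0]
    simp only [List.range'_zero, List.find?_nil]
    rw [List.find?_eq_none]
    intro x hx
    have : x < n := List.mem_range.mp hx
    simp at *
    omega

theorem foldl_if_false {A B : Type} (p : A → Prop) [DecidablePred p] (f : B → A → B) :
    ∀ (l : List A) (init : B), (∀ x ∈ l, ¬ p x) →
    l.foldl (fun acc x => if p x then f acc x else acc) init = init
  | [], _, _ => rfl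
  | a :: t, init, h => by
    simp only [List.foldl_cons, if_neg (h a (by simp))]
    exact foldl_if_false p f t init (fun x hx => h x (by simp [hx]))

theorem slice_natCast_len (dl : List Char) (a b : Nat) (hbn : b ≤ dl.length) :
    (PySem.List.slice dl (some (a : Int)) (some (b : Int))).length = b - a := by
  simp [PySem.List.slice_natCast]
  omega

-- ===== VERDICT (by name: the statement is the Claim_ definition above) =====
theorem dna_r_spec : Claim_equal_dna_r := by
  intro s e dna _
  unfold Spec_dna_r dna_r dna_r_alt
  simp only []
  set sl := s.toList with hsl
  set dl := dna.toList with hdl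
  set el := e.map String.toList with hel
  set n := dl.length with hn
  set memE : Nat → Bool := fun (j : Nat) =>
    decide (PySem.List.slice dl (some ↑j) (some (↑j + 3)) ∈ el) with hmemE
  set startP : Nat → Bool := fun (i : Nat) =>
    decide (PySem.List.slice dl (some ↑i) (some (↑i + ↑sl.length)) = sl) with hstartP
  by_cases hs : (List.range n).filter startP = []
  case pos =>
    have hnone : ∀ i ∈ List.range n, ¬ PySem.List.slice dl (some (i : Int)) (some ((i : Int) + (sl.length : Int))) = sl := by
      intro i hi hcon
      have : i ∈ (List.range n).filter startP := List.mem_filter.mpr ⟨hi, by simp [hstartP, hcon]⟩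
      simp [hs] at this
    rw [hs]
    simp only [List.foldl_nil]
    rw [foldl_if_false (fun (i : Nat) => PySem.List.slice dl (some (i : Int)) (some ((i : Int) + (sl.length : Int))) = sl)
      (fun (acc : List String) (i : Nat) =>
        match (List.range' (i + sl.length) (n - (i + sl.length))).find? (fun (j : Nat) =>
            memE j &&
            pyIsPrime (PySem.List.slice dl (some ↑(i + sl.length)) (some ↑j)).length) with
        | some j => acc ++ [String.ofList (PySem.List.slice dl (some ↑(i + sl.length)) (some ↑j))]
        | none => acc)
      (List.range n) [] hnone]
  case neg =>
  simp only [if_neg hs]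
  have hpw : ((List.range n).filter memE).Pairwise (· < ·) :=
    List.Pairwise.filter memE List.pairwise_lt_range
  set ends := (List.range n).filter memE with hends
  have hinner : ∀ (s_l : Nat),
      ((List.range' (pyFirstAtLeast ends s_l) (ends.length - pyFirstAtLeast ends s_l)).find?
        (fun (t : Nat) => pyIsPrime (ends.getD t 0 - s_l))).map (fun t => ends.getD t 0)
      = List.find? (fun (j : Nat) =>
          memE j &&
          pyIsPrime (PySem.List.slice dl (some ↑s_l) (some ↑j)).length)
        (List.range' s_l (n - s_l)) := by
    intro s_l
    have ht0 : pyFirstAtLeast ends s_l ≤ ends.length := by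
      have hb := falGo_le ends s_l
      omega
    rw [find?_range'_getD ends (fun x => pyIsPrime (x - s_l)) (ends.length - pyFirstAtLeast ends s_l) (pyFirstAtLeast ends s_l) rfl ht0]
    rw [← find?_drop_firstAtLeast _ s_l _ hpw]
    rw [inner_find_eq memE (fun j => pyIsPrime (j - s_l)) s_l n]
    apply find?_congr_mem
    intro j hj
    have hj' := List.mem_range'_1.mp hj
    have hjn : j ≤ n := by omega
    have h1 : decide (s_l ≤ j) = true := by simp [hj'.1]
    rw [h1, Bool.true_and, slice_natCast_len dl s_l j hjn]
  have houter :
      (((List.range n).filter (fun (i : Nat) =>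
          decide (PySem.List.slice dl (some ↑i) (some (↑i + ↑sl.length)) = sl))).foldl
        (fun (acc : List String) (i : Nat) =>
          match (List.range' (pyFirstAtLeast ends (i + sl.length)) (ends.length - pyFirstAtLeast ends (i + sl.length))).find?
              (fun (t : Nat) => pyIsPrime (ends.getD t 0 - (i + sl.length))) with
          | some t => acc ++ [String.ofList (PySem.List.slice dl (some ↑(i + sl.length)) (some ↑(ends.getD t 0)))]
          | none => acc) [])
      = ((List.range n).foldl (fun (acc : List String) (i : Nat) =>
          if PySem.List.slice dl (some ↑i) (some (↑i + ↑sl.length)) = sl then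
            match List.find? (fun (j : Nat) =>
                memE j &&
                pyIsPrime (PySem.List.slice dl (some ↑(i + sl.length)) (some ↑j)).length)
              (List.range' (i + sl.length) (n - (i + sl.length))) with
            | some j => acc ++ [String.ofList (PySem.List.slice dl (some ↑(i + sl.length)) (some ↑j))]
            | none => acc
          else acc) []) := by
    rw [List.foldl_filter]
    congr 1
    funext acc i
    have hmap := hinner (i + sl.length)
    by_cases hc : PySem.List.slice dl (some (i : Int)) (some ((i : Int) + (sl.length : Int))) = sl
    · cases hBf : (List.range' (pyFirstAtLeast ends (i + sl.length)) (ends.length - pyFirstAtLeast ends (i + sl.length))).find?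
          (fun (t : Nat) => pyIsPrime (ends.getD t 0 - (i + sl.length))) with
      | none =>
        rw [hBf] at hmap
        simp only [Option.map_none] at hmap
        rw [← hmap]
        simp [hc]
      | some t =>
        rw [hBf] at hmap
        simp only [Option.map_some] at hmap
        rw [← hmap]
        simp [hc]
    · simp [hc]
  rw [← houter]
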